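-- pv_equiv track=rewrite | github.com/Aysenursvs/nginx_log_analyzer | anlayzer.py | is_bot_by_user_agent
-- ===== SOURCE A (Python) =====
-- def is_bot_by_user_agent(user_agents: list[str]) -> bool:
--     known_bots_pharases = ["bot", "crawl", "spider", "slurp", "archive", "checker"]
--
--     for user_agent in user_agents:
--         lower_user_agent = user_agent.lower()
--         for phrase in known_bots_pharases:
--             if phrase in lower_user_agent:
--                 return True
--     return False
-- ===== SOURCE B (Python) =====
-- import re
--
-- _BOT_RE = re.compile("bot|crawl|spider|slurp|archive|checker")
--
-- def is_bot_by_user_agent(user_agents: list[str]) -> bool: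
--     return any(_BOT_RE.search(ua.lower()) for ua in user_agents)
-- ===== Notes on version B (the rewrite author's own statement) =====
-- stated objective: idiomatic
-- what changed: Replaces the explicit nested loops (per string, per phrase, substring test) with a single precompiled regex alternation searched once per lowercased string via any(); the six-phrase inner loop disappears into one simultaneous automaton scan.
import Mathlib
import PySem

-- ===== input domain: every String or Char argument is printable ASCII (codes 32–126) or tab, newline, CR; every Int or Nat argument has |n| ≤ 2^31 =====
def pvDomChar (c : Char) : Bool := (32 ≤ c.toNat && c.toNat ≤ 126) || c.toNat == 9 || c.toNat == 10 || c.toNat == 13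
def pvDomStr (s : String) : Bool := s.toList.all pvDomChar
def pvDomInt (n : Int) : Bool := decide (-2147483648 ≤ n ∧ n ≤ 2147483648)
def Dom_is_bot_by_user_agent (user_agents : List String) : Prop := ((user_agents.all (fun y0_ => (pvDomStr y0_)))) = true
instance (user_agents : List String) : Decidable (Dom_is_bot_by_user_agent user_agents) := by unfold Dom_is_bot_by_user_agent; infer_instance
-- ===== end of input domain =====

-- B replaces A's nested loops (per string, per phrase, substring test) with one
-- precompiled regex alternation searched once per lowercased string (idiomatic; same result).

-- ===== PORT A =====
def pvKnownBotPhrases : List String := ["bot", "crawl", "spider", "slurp", "archive", "checker"]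

-- inner loop: "for phrase in known_bots_pharases: if phrase in lower_user_agent: return True"
def pvInnerA (phrases : List String) (lower_user_agent : String) : Bool :=
  match phrases with
  | [] => false
  | p :: ps => if PySem.Str.isIn p lower_user_agent then true else pvInnerA ps lower_user_agent

def is_bot_by_user_agent (user_agents : List String) : Bool :=
  match user_agents with
  | [] => false
  | ua :: rest =>
    let lower_user_agent := PySem.Str.lower ua
    if pvInnerA pvKnownBotPhrases lower_user_agent then true else is_bot_by_user_agent rest

-- ===== PORT B =====
-- Port of re.compile("bot|crawl|spider|slurp|archive|checker").search(s): the pattern is a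
-- plain alternation of literals (no metacharacters), so re.search semantics are exactly:
-- scan positions left to right; at each position try the alternatives in order; match found
-- iff some alternative is a prefix of the remaining text. This scan is exact for that pattern.
def pvReSearchAlt (alts : List (List Char)) : List Char → Bool
  | [] => alts.any (fun p => p.isPrefixOf ([] : List Char))
  | c :: t => alts.any (fun p => p.isPrefixOf (c :: t)) || pvReSearchAlt alts t

def pvBotAlts : List (List Char) :=
  ["bot".toList, "crawl".toList, "spider".toList, "slurp".toList, "archive".toList, "checker".toList]

def is_bot_by_user_agent_alt (user_agents : List String) : Bool :=
  user_agents.any (fun ua => pvReSearchAlt pvBotAlts (PySem.Str.lower ua).toList)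

-- ===== PRECONDITION & SPEC =====
def Spec_is_bot_by_user_agent (user_agents : List String) (out : Bool) : Prop := out = is_bot_by_user_agent_alt user_agents
instance (user_agents : List String) (out : Bool) : Decidable (Spec_is_bot_by_user_agent user_agents out) := by unfold Spec_is_bot_by_user_agent; infer_instance

-- ===== CLAIM (what is proved, stated in full; the proofs are below) =====
def Claim_equal_is_bot_by_user_agent : Prop := ∀ (user_agents : List String), Dom_is_bot_by_user_agent user_agents → Spec_is_bot_by_user_agent user_agents (is_bot_by_user_agent user_agents)

-- ===== LEMMAS AND PROOFS =====

-- The automaton scan finds a match iff some alternative occurs as a prefix of some suffix.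
theorem pvReSearchAlt_eq_true_iff (alts : List (List Char)) (cs : List Char) :
    pvReSearchAlt alts cs = true ↔ ∃ p ∈ alts, ∃ j, p <+: cs.drop j := by
  induction cs with
  | nil =>
    simp [pvReSearchAlt, List.any_eq_true, List.IsPrefix]
  | cons c t ih =>
    simp only [pvReSearchAlt, Bool.or_eq_true, List.any_eq_true, ih]
    constructor
    · rintro (⟨p, hp, hpre⟩ | ⟨p, hp, j, hpre⟩)
      · exact ⟨p, hp, 0, by simpa using hpre⟩
      · exact ⟨p, hp, j + 1, by simpa using hpre⟩
    · rintro ⟨p, hp, j, hpre⟩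
      cases j with
      | zero => exact Or.inl ⟨p, hp, by simpa using hpre⟩
      | succ j => exact Or.inr ⟨p, hp, j, by simpa using hpre⟩

-- The scan over a list of alternatives equals the disjunction of Python substring tests.
theorem pvReSearchAlt_eq_any_isIn (alts : List (List Char)) (cs : List Char) :
    pvReSearchAlt alts cs = alts.any (fun p => PySem.Chars.isIn p cs) := by
  rw [Bool.eq_iff_iff, pvReSearchAlt_eq_true_iff]
  simp only [List.any_eq_true]
  constructor
  · rintro ⟨p, hp, j, hpre⟩
    exact ⟨p, hp, (PySem.Chars.exists_prefix_drop_iff_isIn p cs).mp ⟨j, hpre⟩⟩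
  · rintro ⟨p, hp, h⟩
    obtain ⟨j, hpre⟩ := (PySem.Chars.exists_prefix_drop_iff_isIn p cs).mpr h
    exact ⟨p, hp, j, hpre⟩

-- A's inner phrase loop is the same disjunction.
theorem pvInnerA_eq_any (phrases : List String) (s : String) :
    pvInnerA phrases s = phrases.any (fun p => PySem.Str.isIn p s) := by
  induction phrases with
  | nil => rfl
  | cons p ps ih =>
    simp only [pvInnerA, List.any_cons, ih]
    by_cases h : PySem.Str.isIn p s <;> simp [h]

theorem pvPerString (ua : String) :
    pvInnerA pvKnownBotPhrases (PySem.Str.lower ua)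
      = pvReSearchAlt pvBotAlts (PySem.Str.lower ua).toList := by
  rw [pvInnerA_eq_any, pvReSearchAlt_eq_any_isIn]
  simp [pvKnownBotPhrases, pvBotAlts, PySem.Str.isIn_eq]

-- ===== VERDICT (by name: the statement is the Claim_ definition above) =====
theorem is_bot_by_user_agent_spec : Claim_equal_is_bot_by_user_agent := by
  intro user_agents hdom
  unfold Spec_is_bot_by_user_agent
  induction user_agents with
  | nil => rfl
  | cons ua rest ih =>
    have hrest : Dom_is_bot_by_user_agent rest := by
      unfold Dom_is_bot_by_user_agent at hdom ⊢
      simp only [List.all_cons, Bool.and_eq_true] at hdom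
      exact hdom.2
    have ih' := ih hrest
    show (if pvInnerA pvKnownBotPhrases (PySem.Str.lower ua) then true
          else is_bot_by_user_agent rest) = _
    rw [pvPerString, ih']
    unfold is_bot_by_user_agent_alt
    rw [List.any_cons]
    cases pvReSearchAlt pvBotAlts (PySem.Str.lower ua).toList <;> simp
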